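-- pv_equiv track=rewrite | github.com/pypi-data/pypi-mirror-14 | packages/plier/plier-0.1.0.tar.gz/plier-0.1.0/plier/utils/regex.py | re_wrap
-- ===== SOURCE A (Python) =====
-- def re_wrap(p):
--     """
--     Wrap a regular expression if necessary, i.e., if it contains unescaped '|'
--     in the outermost level.
--     """
--     escaped = False
--     level = 0
--     for c in p:
--         if c == '\\':
--             escaped = not escaped
--         elif c == '(' and not escaped:
--             level += 1
--         elif c == ')' and not escaped:
--             level -= 1
--         elif c == '|' and not escaped:
--             if level == 0:  # outmost level, must wrap
--                 p = '(' + p + ')'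
--                 break
--         else:
--             escaped = False
--     return p
-- ===== SOURCE B (Python) =====
-- def re_wrap(p):
--     # Staged passes: 1) drop escape sequences, 2) prefix-sum of paren depths,
--     # 3) check for a '|' at depth 0; wrap once at the end if one exists.
--     s = _drop_escaped(p)
--     pre = [0]
--     for c in s:
--         pre.append(pre[-1] + (c == '(') - (c == ')'))
--     if any(c == '|' and d == 0 for c, d in zip(s, pre)):
--         return '(' + p + ')'
--     return p
--
--
-- def _drop_escaped(p):
--     out = []
--     skip = False
--     for c in p:
--         if skip:
--             skip = False
--         elif c == '\\':
--             skip = True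
--         else:
--             out.append(c)
--     return ''.join(out)
-- ===== Notes on version B (the rewrite author's own statement) =====
-- stated objective: alternative
-- what changed: Replaces the single stateful scan with early break by three staged passes: first strip all escape sequences, then build the prefix-sum list of parenthesis depths, then test with any/zip whether some alternation bar sits at depth zero, wrapping once at the end.
import Mathlib
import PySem

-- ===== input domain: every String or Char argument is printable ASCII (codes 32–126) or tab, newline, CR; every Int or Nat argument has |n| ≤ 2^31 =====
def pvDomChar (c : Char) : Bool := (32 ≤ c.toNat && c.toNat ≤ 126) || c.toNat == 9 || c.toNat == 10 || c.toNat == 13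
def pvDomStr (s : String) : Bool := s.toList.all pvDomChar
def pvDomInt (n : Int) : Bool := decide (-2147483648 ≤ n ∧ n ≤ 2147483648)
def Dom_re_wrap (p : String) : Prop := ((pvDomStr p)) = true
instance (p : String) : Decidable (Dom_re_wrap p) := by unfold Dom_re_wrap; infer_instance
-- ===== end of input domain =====

-- B replaces A's single stateful scan (escape flag + depth + early break) by three
-- staged passes: strip escape sequences, prefix-sum the paren depths, then any/zip
-- for a '|' at depth 0; objective: alternative decomposition, same cost.

-- ===== PORT A =====
-- Literal port of A: loop over characters with (escaped, level) state; on an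
-- unescaped top-level '|' rebind p to '(' ++ p ++ ')' and break.
def reWrapLoopA (p : String) : List Char → Bool → Int → String
  | [], _, _ => p
  | c :: rest, escaped, level =>
    if c = '\\' then reWrapLoopA p rest (!escaped) level
    else if c = '(' ∧ escaped = false then reWrapLoopA p rest escaped (level + 1)
    else if c = ')' ∧ escaped = false then reWrapLoopA p rest escaped (level - 1)
    else if c = '|' ∧ escaped = false then
      if level = 0 then "(" ++ p ++ ")" else reWrapLoopA p rest escaped level
    else reWrapLoopA p rest false level

def re_wrap (p : String) : String := reWrapLoopA p p.toList false 0

-- ===== PORT B =====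
-- Pass 1 of Source B: drop every escape sequence (the backslash and the escaped char).
def dropEscapedB : List Char → Bool → List Char
  | [], _ => []
  | c :: rest, skip =>
    if skip then dropEscapedB rest false
    else if c = '\\' then dropEscapedB rest true
    else c :: dropEscapedB rest false

-- Pass 2 of Source B: the prefix sums of the paren depth (pre[-1] + (c=='(') - (c==')'));
-- returns the depth in front of each character (zip s pre uses the first n entries).
def prefixDepthsB : List Char → Int → List Int
  | [], _ => []
  | c :: rest, d =>
    d :: prefixDepthsB rest (d + (if c = '(' then 1 else 0) - (if c = ')' then 1 else 0))

def re_wrap_alt (p : String) : String :=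
  let s := dropEscapedB p.toList false
  if (s.zip (prefixDepthsB s 0)).any (fun cd => cd.1 = '|' && cd.2 = 0)
  then "(" ++ p ++ ")" else p

-- ===== PRECONDITION & SPEC =====
def Spec_re_wrap (p : String) (out : String) : Prop := out = re_wrap_alt p
instance (p : String) (out : String) : Decidable (Spec_re_wrap p out) := by unfold Spec_re_wrap; infer_instance

-- ===== CLAIM (what is proved, stated in full; the proofs are below) =====
def Claim_equal_re_wrap : Prop := ∀ (p : String), Dom_re_wrap p → Spec_re_wrap p (re_wrap p)

-- ===== LEMMAS AND PROOFS =====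

-- B's detection predicate, for the proofs: a '|' at depth 0 in the stripped list.
def needsZip (s : List Char) (l : Int) : Bool :=
  (s.zip (prefixDepthsB s l)).any (fun cd => cd.1 = '|' && cd.2 = 0)

theorem needsZip_nil (l : Int) : needsZip [] l = false := by
  simp [needsZip, prefixDepthsB]

theorem needsZip_cons (c : List Char) (x : Char) (l : Int) :
    needsZip (x :: c) l =
      ((x = '|' && l = 0) ||
        needsZip c (l + (if x = '(' then 1 else 0) - (if x = ')' then 1 else 0))) := by
  simp [needsZip, prefixDepthsB]

-- Main invariant: A's loop returns the wrapped string iff B's detector fires on the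
-- suffix with escapes stripped (skip state matching A's escaped flag).
theorem loopA_eq (cs : List Char) : ∀ (esc : Bool) (level : Int) (p : String),
    reWrapLoopA p cs esc level =
      (if needsZip (dropEscapedB cs esc) level then "(" ++ p ++ ")" else p) := by
  induction cs with
  | nil => intro esc level p; simp [reWrapLoopA, dropEscapedB, needsZip_nil]
  | cons c rest ih =>
    intro esc level p
    cases esc with
    | true =>
      by_cases hb : c = '\\'
      · simp [reWrapLoopA, dropEscapedB, hb, ih false level p]
      · by_cases ho : c = '('
        · simp [reWrapLoopA, dropEscapedB, hb, ho, ih false level p]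
        · by_cases hc : c = ')'
          · simp [reWrapLoopA, dropEscapedB, hb, ho, hc, ih false level p]
          · by_cases hp : c = '|'
            · simp [reWrapLoopA, dropEscapedB, hb, ho, hc, hp, ih false level p]
            · simp [reWrapLoopA, dropEscapedB, hb, ho, hc, hp, ih false level p]
    | false =>
      by_cases hb : c = '\\'
      · simp [reWrapLoopA, dropEscapedB, hb, ih true level p]
      · by_cases ho : c = '('
        · simp [reWrapLoopA, dropEscapedB, needsZip_cons, ho, ih false (level + 1) p]
        · by_cases hc : c = ')'
          · simp [reWrapLoopA, dropEscapedB, needsZip_cons, hb, ho, hc, ih false (level - 1) p]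
          · by_cases hp : c = '|'
            · by_cases hl : level = 0
              · simp [reWrapLoopA, dropEscapedB, needsZip_cons, hb, ho, hc, hp, hl]
              · simp [reWrapLoopA, dropEscapedB, needsZip_cons, hb, ho, hc, hp, hl, ih false level p]
            · simp [reWrapLoopA, dropEscapedB, needsZip_cons, hb, ho, hc, hp, ih false level p]

-- ===== VERDICT =====
theorem re_wrap_spec : Claim_equal_re_wrap := by
  intro p _
  unfold Spec_re_wrap re_wrap re_wrap_alt
  exact loopA_eq p.toList false 0 p
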